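-- pv_equiv track=rewrite | github.com/K1521/geometricalgebra1 | old/blademulexplained.py | blademul6reverse
-- ===== SOURCE A (Python) =====
-- def blademul6reverse(b1,b2):
--     bas1acc=b1>>1
--     i=1
--     while True:
--         shifted=bas1acc>>i
--         if shifted==0:
--             break
--         bas1acc^=shifted
--         i<<=1
--     invert=((bas1acc&b2).bit_count()&1)
--     return invert
-- ===== SOURCE B (Python) =====
-- def blademul6reverse(b1, b2):
--     a = b1 >> 1
--     swaps = 0
--     while a:
--         swaps += (a & b2).bit_count()
--         a >>= 1
--     return swaps & 1
-- ===== Notes on version B (the rewrite author's own statement) =====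
-- stated objective: alternative
-- what changed: Replaces A's logarithmic parallel-prefix suffix-XOR fold (acc ^= acc>>i with doubling i, then one popcount of acc&b2) by a direct linear inversion-count loop that shifts b1>>1 down one bit at a time, summing popcount(a&b2) at every shift, and returns the sum's parity. Pre_ excludes b1 < 0 (blade masks are nonnegative): there B's shift loop never terminates, while A still returns a parity via Python's infinite-two's-complement xor cancellation.
-- outside the precondition, e.g. on blademul6reverse(-1, -1): A returns 0, B does not finish within the time limit; on blademul6reverse(-5, 5): A returns 1, B does not finish within the time limit
import Mathlib
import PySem

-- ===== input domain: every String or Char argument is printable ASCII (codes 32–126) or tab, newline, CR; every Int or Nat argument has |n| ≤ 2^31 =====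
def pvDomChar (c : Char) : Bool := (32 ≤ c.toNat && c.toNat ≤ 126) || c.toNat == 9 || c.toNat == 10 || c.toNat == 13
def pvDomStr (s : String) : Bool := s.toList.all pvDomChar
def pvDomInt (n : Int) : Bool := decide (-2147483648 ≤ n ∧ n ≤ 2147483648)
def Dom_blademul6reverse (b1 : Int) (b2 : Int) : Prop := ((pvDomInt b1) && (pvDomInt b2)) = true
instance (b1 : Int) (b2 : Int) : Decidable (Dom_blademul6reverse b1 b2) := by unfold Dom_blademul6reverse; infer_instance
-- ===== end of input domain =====

-- B replaces A's logarithmic suffix-XOR parallel-prefix fold by a direct linear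
-- shift-and-popcount inversion-count loop (objective: alternative algorithm, similar cost).

-- ===== PORT A =====
-- The while-loop of A; `i` is Python's shift-count int (always a positive power of two here,
-- so the Int-by-Int shifts agree with Python's, which raises on a negative shift count).
-- `fuel` only makes the recursion total: on every input admitted by Dom_ ∧ Pre_ the loop
-- stops long before the fuel runs out (proved below), so no result ever depends on it.
def blademulLoop : Nat → Int → Int → Int
  | 0, bas1acc, _ => bas1acc
  | fuel+1, bas1acc, i =>
    let shifted := bas1acc >>> i
    if shifted = 0 then bas1acc
    else blademulLoop fuel (PySem.Int.bxor bas1acc shifted) (i <<< (1 : Int))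

def blademul6reverse (b1 : Int) (b2 : Int) : Int :=
  let bas1acc := blademulLoop 64 (b1 >>> (1 : Int)) 1
  PySem.Int.band ((PySem.Int.bitCount (PySem.Int.band bas1acc b2) : Int)) 1

-- ===== PORT B =====
-- The while-loop of B (fuel likewise only for totality).
def blademulAltLoop : Nat → Int → Int → Int → Int
  | 0, _, swaps, _ => swaps
  | fuel+1, a, swaps, b2 =>
    if a = 0 then swaps
    else blademulAltLoop fuel (a >>> (1 : Int)) (swaps + (PySem.Int.bitCount (PySem.Int.band a b2) : Int)) b2

def blademul6reverse_alt (b1 : Int) (b2 : Int) : Int :=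
  PySem.Int.band (blademulAltLoop 64 (b1 >>> (1 : Int)) 0 b2) 1

-- ===== PRECONDITION & SPEC =====
-- Pre_ excludes b1 < 0 (blade masks are nonnegative): there B's natural shift loop never
-- finishes, while A still returns a parity through Python's infinite-two's-complement xor
-- cancellation.
def Pre_blademul6reverse (b1 : Int) (b2 : Int) : Prop := 0 ≤ b1
instance (b1 : Int) (b2 : Int) : Decidable (Pre_blademul6reverse b1 b2) := by unfold Pre_blademul6reverse; infer_instance
def pvWitness_blademul6reverse : Int × Int := (6, 3)
def Spec_blademul6reverse (b1 : Int) (b2 : Int) (out : Int) : Prop := out = blademul6reverse_alt b1 b2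
instance (b1 : Int) (b2 : Int) (out : Int) : Decidable (Spec_blademul6reverse b1 b2 out) := by unfold Spec_blademul6reverse; infer_instance

-- ===== CLAIM (what is proved, stated in full; the proofs are below) =====
def Claim_equal_blademul6reverse : Prop := ∀ (b1 : Int) (b2 : Int), Dom_blademul6reverse b1 b2 → Pre_blademul6reverse b1 b2 → Spec_blademul6reverse b1 b2 (blademul6reverse b1 b2)

-- ===== LEMMAS AND PROOFS =====

-- total halving recurrence for Python's bit_count on naturals
lemma pc_half (k : Nat) : PySem.Int.bitCount (k : Int) = k % 2 + PySem.Int.bitCount ((k / 2 : Nat) : Int) := by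
  rcases Nat.eq_zero_or_pos k with h | h
  · subst h; simp
  · exact PySem.Int.bitCount_natCast h

-- parity of the popcount of a xor
lemma pc_xor (x : Nat) : ∀ y : Nat,
    PySem.Int.bitCount ((x ^^^ y : Nat) : Int) % 2
      = (PySem.Int.bitCount (x : Int) + PySem.Int.bitCount (y : Int)) % 2 := by
  induction x using Nat.strong_induction_on with
  | _ x ih =>
    intro y
    rcases Nat.eq_zero_or_pos x with hx | hx
    · subst hx; simp [Nat.zero_xor]
    · have hdiv : (x ^^^ y) / 2 = x / 2 ^^^ y / 2 := by
        have := Nat.shiftRight_xor_distrib (a := x) (b := y) (i := 1)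
        simpa [Nat.shiftRight_succ, Nat.shiftRight_zero] using this
      have hmod : (x ^^^ y) % 2 = (x + y) % 2 := Nat.xor_mod_two_eq
      have ih2 := ih (x / 2) (Nat.div_lt_self hx (by norm_num)) (y / 2)
      have h1 := pc_half (x ^^^ y)
      have h2 := pc_half x
      have h3 := pc_half y
      rw [hdiv] at h1
      omega

-- PySem.Int.band with a natural left argument, in closed Nat form
lemma band_nat (x : Nat) (b : Int) :
    PySem.Int.band (x : Int) b
      = if 0 ≤ b then ((x &&& b.toNat : Nat) : Int) else ((x - (x &&& (-b - 1).toNat) : Nat) : Int) := by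
  simp [PySem.Int.band]

-- subtracting the common bits is xoring them away
lemma sub_and (x : Nat) : ∀ w : Nat, x - (x &&& w) = x ^^^ (x &&& w) := by
  induction x using Nat.strong_induction_on with
  | _ x ih =>
    intro w
    rcases Nat.eq_zero_or_pos x with hx | hx
    · subst hx; simp
    · have hdiv : (x &&& w) / 2 = x / 2 &&& w / 2 := Nat.and_div_two
      have hcomm : (x &&& w) &&& 1 = (x &&& 1) &&& w := by
        rw [Nat.and_assoc, Nat.and_comm w 1, ← Nat.and_assoc]
      have hmodle : (x &&& w) % 2 ≤ x % 2 := by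
        rw [← Nat.and_one_is_mod, ← Nat.and_one_is_mod, hcomm]
        exact Nat.and_le_left
      have hdivle : (x &&& w) / 2 ≤ x / 2 := by rw [hdiv]; exact Nat.and_le_left
      have ihx := ih (x / 2) (Nat.div_lt_self hx (by norm_num)) (w / 2)
      rw [← hdiv] at ihx
      have hxormod : (x ^^^ (x &&& w)) % 2 = (x + (x &&& w)) % 2 := Nat.xor_mod_two_eq
      have hxordiv : (x ^^^ (x &&& w)) / 2 = x / 2 ^^^ (x &&& w) / 2 := by
        have := Nat.shiftRight_xor_distrib (a := x) (b := x &&& w) (i := 1)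
        simpa [Nat.shiftRight_succ, Nat.shiftRight_zero] using this
      have e3 : (x ^^^ (x &&& w)) = 2 * ((x ^^^ (x &&& w)) / 2) + (x ^^^ (x &&& w)) % 2 := by omega
      rw [hxordiv, ← ihx] at e3
      omega

-- parity of popcount(band · b) is additive over xor, for any second argument b
lemma band_xor_par (b : Int) (x y : Nat) :
    PySem.Int.bitCount (PySem.Int.band ((x ^^^ y : Nat) : Int) b) % 2
      = (PySem.Int.bitCount (PySem.Int.band (x : Int) b)
          + PySem.Int.bitCount (PySem.Int.band (y : Int) b)) % 2 := by
  rw [band_nat, band_nat, band_nat]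
  by_cases hb : 0 ≤ b
  · simp only [if_pos hb]
    rw [Nat.and_xor_distrib_right]
    exact pc_xor _ _
  · simp only [if_neg hb]
    rw [sub_and, sub_and, sub_and, Nat.and_xor_distrib_right]
    have h1 := pc_xor (x ^^^ y) ((x &&& (-b - 1).toNat) ^^^ (y &&& (-b - 1).toNat))
    have h2 := pc_xor x (x &&& (-b - 1).toNat)
    have h3 := pc_xor y (y &&& (-b - 1).toNat)
    have h4 := pc_xor x y
    have h5 := pc_xor (x &&& (-b - 1).toNat) (y &&& (-b - 1).toNat)
    omega

-- the suffix xor  m ^ (m>>1) ^ (m>>2) ^ …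
def sufXor (m : Nat) : Nat :=
  if h : m = 0 then 0 else m ^^^ sufXor (m >>> 1)
decreasing_by
  simp only [Nat.shiftRight_succ, Nat.shiftRight_zero]
  exact Nat.div_lt_self (Nat.pos_of_ne_zero h) (by norm_num)

-- the parallel-prefix iterates computed by A's loop
def xit : Nat → Nat → Nat
  | 0, m => m
  | t+1, m => xit t m ^^^ (xit t m >>> 2 ^ t)

lemma xit_shift (t : Nat) : ∀ m k : Nat, xit t m >>> k = xit t (m >>> k) := by
  induction t with
  | zero => intro m k; rfl
  | succ t ih =>
    intro m k
    show (xit t m ^^^ xit t m >>> 2 ^ t) >>> k = xit t (m >>> k) ^^^ xit t (m >>> k) >>> 2 ^ t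
    rw [Nat.shiftRight_xor_distrib, ← Nat.shiftRight_add, Nat.add_comm (2 ^ t) k,
        Nat.shiftRight_add, ih m k]

lemma xit_lt (t : Nat) {m j : Nat} (h : m < 2 ^ j) : xit t m < 2 ^ j := by
  induction t with
  | zero => exact h
  | succ t ih =>
    exact Nat.xor_lt_two_pow ih (lt_of_le_of_lt (Nat.shiftRight_le _ _) ih)

lemma sr_zero_iff (m j : Nat) : m >>> j = 0 ↔ m < 2 ^ j := by
  rw [Nat.shiftRight_eq_div_pow]
  exact Nat.div_eq_zero_iff_lt (Nat.two_pow_pos j)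

lemma xit_zero_iff (t : Nat) : ∀ m j : Nat, (xit t m >>> j = 0 ↔ m >>> j = 0) := by
  induction t with
  | zero => intro m j; rfl
  | succ t ih =>
    intro m j
    constructor
    · intro h
      have hsplit : xit (t + 1) m >>> j = (xit t m >>> j) ^^^ ((xit t m >>> j) >>> 2 ^ t) := by
        show (xit t m ^^^ xit t m >>> 2 ^ t) >>> j = _
        rw [Nat.shiftRight_xor_distrib, ← Nat.shiftRight_add, Nat.add_comm (2 ^ t) j,
            Nat.shiftRight_add]
      rw [hsplit] at h
      have heq : xit t m >>> j = (xit t m >>> j) >>> 2 ^ t := Nat.xor_eq_zero_iff.mp h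
      have hz : xit t m >>> j = 0 := by
        by_contra hne
        have hpos : 0 < xit t m >>> j := Nat.pos_of_ne_zero hne
        have hlt : (xit t m >>> j) >>> 2 ^ t < xit t m >>> j := by
          rw [Nat.shiftRight_eq_div_pow]
          exact Nat.div_lt_self hpos (Nat.one_lt_two_pow_iff.mpr (Nat.two_pow_pos t).ne')
        omega
      exact (ih m j).mp hz
    · intro h
      have hlt : m < 2 ^ j := (sr_zero_iff m j).mp h
      exact (sr_zero_iff _ j).mpr (xit_lt _ hlt)

lemma sufXor_zero : sufXor 0 = 0 := by rw [sufXor]; simp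

lemma sufXor_xit (t : Nat) : ∀ m : Nat, sufXor m = xit t m ^^^ sufXor (m >>> 2 ^ t) := by
  induction t with
  | zero =>
    intro m
    rcases Nat.eq_zero_or_pos m with hm | hm
    · subst hm; simp [sufXor_zero, xit]
    · rw [sufXor, dif_neg (Nat.pos_iff_ne_zero.mp hm)]
      simp [xit]
  | succ t ih =>
    intro m
    rw [ih m, ih (m >>> 2 ^ t), ← Nat.xor_assoc]
    have h1 : xit t (m >>> 2 ^ t) = xit t m >>> 2 ^ t := (xit_shift t m (2 ^ t)).symm
    have h2 : m >>> 2 ^ t >>> 2 ^ t = m >>> 2 ^ (t + 1) := by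
      rw [← Nat.shiftRight_add]
      congr 1
      rw [pow_succ]
      omega
    rw [h1, h2]
    rfl

lemma sufXor_of_stop {t m : Nat} (h : m >>> 2 ^ t = 0) : sufXor m = xit t m := by
  rw [sufXor_xit t m, h, sufXor_zero, Nat.xor_zero]

-- casts of the primitive Int operations on naturals
lemma int_sr (a k : Nat) : ((a : Int) >>> ((k : Nat) : Int)) = ((a >>> k : Nat) : Int) :=
  Int.shiftRight_natCast a k
lemma int_sr1 (a : Nat) : ((a : Int) >>> (1 : Int)) = ((a >>> 1 : Nat) : Int) := by
  have : (1 : Int) = ((1 : Nat) : Int) := by norm_num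
  rw [this, int_sr]
lemma int_sl (a k : Nat) : ((a : Int) <<< ((k : Nat) : Int)) = ((a <<< k : Nat) : Int) :=
  Int.shiftLeft_natCast a k

-- A's loop computes the suffix xor
lemma aloop_eq (m : Nat) : ∀ fuel t : Nat, m >>> 2 ^ (t + fuel) = 0 →
    blademulLoop (fuel + 1) ((xit t m : Nat) : Int) ((2 ^ t : Nat) : Int) = ((sufXor m : Nat) : Int) := by
  intro fuel
  induction fuel with
  | zero =>
    intro t h
    have hz : xit t m >>> 2 ^ t = 0 := (xit_zero_iff t m (2 ^ t)).mpr (by simpa using h)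
    show (if ((xit t m : Nat) : Int) >>> ((2 ^ t : Nat) : Int) = 0 then ((xit t m : Nat) : Int)
          else blademulLoop 0 _ _) = _
    rw [int_sr, hz]
    simp [sufXor_of_stop h]
  | succ fuel ih =>
    intro t h
    by_cases hz : xit t m >>> 2 ^ t = 0
    · show (if ((xit t m : Nat) : Int) >>> ((2 ^ t : Nat) : Int) = 0 then ((xit t m : Nat) : Int)
            else _) = _
      rw [int_sr, hz]
      have hm : m >>> 2 ^ t = 0 := (xit_zero_iff t m (2 ^ t)).mp hz
      simp [sufXor_of_stop hm]
    · show (if ((xit t m : Nat) : Int) >>> ((2 ^ t : Nat) : Int) = 0 then ((xit t m : Nat) : Int)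
            else blademulLoop (fuel + 1)
              (PySem.Int.bxor ((xit t m : Nat) : Int) (((xit t m : Nat) : Int) >>> ((2 ^ t : Nat) : Int)))
              (((2 ^ t : Nat) : Int) <<< (1 : Int))) = _
      rw [int_sr]
      rw [if_neg (by exact_mod_cast hz)]
      have hbx : PySem.Int.bxor ((xit t m : Nat) : Int) ((xit t m >>> 2 ^ t : Nat) : Int)
          = ((xit (t + 1) m : Nat) : Int) := by
        rw [PySem.Int.bxor_natCast]; rfl
      have hone : (1 : Int) = ((1 : Nat) : Int) := by norm_num
      have hsl : (((2 ^ t : Nat) : Int) <<< (1 : Int)) = ((2 ^ (t + 1) : Nat) : Int) := by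
        rw [hone, int_sl]
        congr 1
        rw [Nat.shiftLeft_eq, pow_succ 2 t]
      rw [hbx, hsl]
      exact ih (t + 1) (by
        have : t + 1 + fuel = t + (fuel + 1) := by omega
        rw [this]; exact h)

-- running total of B's loop
def ssum (b2 : Int) (m : Nat) : Nat :=
  if h : m = 0 then 0
  else PySem.Int.bitCount (PySem.Int.band (m : Int) b2) + ssum b2 (m >>> 1)
decreasing_by
  simp only [Nat.shiftRight_succ, Nat.shiftRight_zero]
  exact Nat.div_lt_self (Nat.pos_of_ne_zero h) (by norm_num)

lemma ssum_zero (b2 : Int) : ssum b2 0 = 0 := by rw [ssum]; simp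

-- B's loop computes swaps + ssum
lemma bloop_eq (b2 : Int) : ∀ fuel a s : Nat, a >>> fuel = 0 →
    blademulAltLoop fuel ((a : Nat) : Int) ((s : Nat) : Int) b2 = ((s + ssum b2 a : Nat) : Int) := by
  intro fuel
  induction fuel with
  | zero =>
    intro a s h
    have ha : a = 0 := by simpa using h
    subst ha
    simp [blademulAltLoop, ssum_zero]
  | succ fuel ih =>
    intro a s h
    by_cases ha : a = 0
    · subst ha
      simp [blademulAltLoop, ssum_zero]
    · show (if ((a : Nat) : Int) = 0 then ((s : Nat) : Int)
            else blademulAltLoop fuel (((a : Nat) : Int) >>> (1 : Int))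
              (((s : Nat) : Int) + (PySem.Int.bitCount (PySem.Int.band ((a : Nat) : Int) b2) : Int)) b2) = _
      rw [if_neg (by exact_mod_cast ha)]
      rw [int_sr1]
      have hs : ((s : Nat) : Int) + (PySem.Int.bitCount (PySem.Int.band ((a : Nat) : Int) b2) : Int)
          = ((s + PySem.Int.bitCount (PySem.Int.band ((a : Nat) : Int) b2) : Nat) : Int) := by
        push_cast; ring
      rw [hs]
      have hfa : (a >>> 1) >>> fuel = 0 := by
        rw [← Nat.shiftRight_add, Nat.add_comm]
        exact h
      rw [ih (a >>> 1) _ hfa]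
      congr 1
      conv_rhs => rw [ssum]
      rw [dif_neg ha]
      omega

-- the central parity identity:  popcount(sufXor m & b2)  ≡  Σ_s popcount((m>>s) & b2)  (mod 2)
lemma main_par (b2 : Int) : ∀ m : Nat,
    PySem.Int.bitCount (PySem.Int.band ((sufXor m : Nat) : Int) b2) % 2 = ssum b2 m % 2 := by
  intro m
  induction m using Nat.strong_induction_on with
  | _ m ih =>
    rcases Nat.eq_zero_or_pos m with hm | hm
    · subst hm
      rw [sufXor_zero, ssum_zero]
      have hb0 : PySem.Int.band ((0 : Nat) : Int) b2 = ((0 : Nat) : Int) := by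
        rw [band_nat]; split <;> simp
      rw [hb0]
      simp
    · have hx : sufXor m = m ^^^ sufXor (m >>> 1) := by
        rw [sufXor]; simp only [dif_neg (Nat.pos_iff_ne_zero.mp hm)]
      have hlt : m >>> 1 < m := by
        simp only [Nat.shiftRight_succ, Nat.shiftRight_zero]
        exact Nat.div_lt_self hm (by norm_num)
      have h1 := band_xor_par b2 m (sufXor (m >>> 1))
      have h2 := ih (m >>> 1) hlt
      have h3 : ssum b2 m = PySem.Int.bitCount (PySem.Int.band (m : Int) b2) + ssum b2 (m >>> 1) := by
        rw [ssum]; simp only [dif_neg (Nat.pos_iff_ne_zero.mp hm)]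
      rw [hx]
      omega

-- final parity extraction:  band ↑k 1 = ↑(k % 2)
lemma band_one_nat (k : Nat) : PySem.Int.band (k : Int) 1 = ((k % 2 : Nat) : Int) := by
  have : PySem.Int.band (k : Int) ((1 : Nat) : Int) = ((k &&& 1 : Nat) : Int) := PySem.Int.band_natCast k 1
  simpa [Nat.and_one_is_mod] using this

-- ===== VERDICT (by name: the statement is the Claim_ definition above) =====
theorem blademul6reverse_spec : Claim_equal_blademul6reverse := by
  intro b1 b2 hdom hpre
  unfold Spec_blademul6reverse blademul6reverse blademul6reverse_alt
  have hb1 : b1 = ((b1.toNat : Nat) : Int) := (Int.toNat_of_nonneg hpre).symm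
  set m : Nat := b1.toNat >>> 1 with hm
  have hshift : b1 >>> (1 : Int) = ((m : Nat) : Int) := by rw [hb1, int_sr1]
  have hdom' : b1 ≤ 2147483648 := by
    unfold Dom_blademul6reverse pvDomInt at hdom
    simp only [Bool.and_eq_true, decide_eq_true_eq] at hdom
    exact hdom.1.2
  have hmlt : m < 2 ^ 31 := by
    have : b1.toNat ≤ 2147483648 := by omega
    have h31 : b1.toNat >>> 1 ≤ 2147483648 / 2 := by
      rw [Nat.shiftRight_eq_div_pow]
      simpa using Nat.div_le_div_right (c := 2) this
    omega
  -- A side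
  have hA : blademulLoop 64 (b1 >>> (1 : Int)) 1 = ((sufXor m : Nat) : Int) := by
    rw [hshift]
    have h1 : ((1 : Nat) : Int) = (1 : Int) := by norm_num
    have := aloop_eq m 63 0 (by
      rw [sr_zero_iff]
      calc m < 2 ^ 31 := hmlt
        _ ≤ 2 ^ 2 ^ 63 := Nat.pow_le_pow_right (by norm_num) (by norm_num))
    simpa [xit] using this
  -- B side
  have hB : blademulAltLoop 64 (b1 >>> (1 : Int)) 0 b2 = ((ssum b2 m : Nat) : Int) := by
    rw [hshift]
    have := bloop_eq b2 64 m 0 (by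
      rw [sr_zero_iff]
      calc m < 2 ^ 31 := hmlt
        _ ≤ 2 ^ 64 := Nat.pow_le_pow_right (by norm_num) (by norm_num))
    simpa using this
  rw [hA, hB, band_one_nat, band_one_nat, main_par b2 m]
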